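-- pv_equiv track=rewrite | github.com/xamgUmlatu/LexiShift | core/lexishift_core/lexicon/word_package.py | _extract_primary_variant
-- ===== SOURCE A (Python) =====
-- def _extract_primary_variant(text: str) -> str:
--     if not text:
--         return ""
--     candidate = text
--     for separator in (";", ",", "/", "|"):
--         if separator in candidate:
--             candidate = candidate.split(separator, 1)[0]
--     return candidate.strip()
-- ===== SOURCE B (Python) =====
-- def _extract_primary_variant(text: str) -> str:
--     if not text:
--         return ""
--     idx = len(text)
--     for sep in (";", ",", "/", "|"):
--         pos = text.find(sep)
--         if pos != -1 and pos < idx: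
--             idx = pos
--     return text[:idx].strip()
-- ===== Notes on version B (the rewrite author's own statement) =====
-- stated objective: simpler
-- what changed: Instead of repeatedly splitting and truncating the candidate string once per separator, B computes the minimum first-occurrence index over the four separators in the original text and takes a single slice before stripping.
import Mathlib
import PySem

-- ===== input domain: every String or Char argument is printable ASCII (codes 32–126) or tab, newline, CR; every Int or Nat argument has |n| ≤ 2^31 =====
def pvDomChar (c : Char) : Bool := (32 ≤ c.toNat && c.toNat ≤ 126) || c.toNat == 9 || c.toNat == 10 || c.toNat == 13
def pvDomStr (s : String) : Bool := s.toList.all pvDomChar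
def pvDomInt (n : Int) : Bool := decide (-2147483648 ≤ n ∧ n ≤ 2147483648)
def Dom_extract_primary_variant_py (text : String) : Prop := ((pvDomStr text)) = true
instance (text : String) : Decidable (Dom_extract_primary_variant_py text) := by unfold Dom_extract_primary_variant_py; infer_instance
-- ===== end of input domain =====

-- B replaces A's repeated split-and-truncate loop by one minimum-of-find-positions computation and a single slice; objective: simpler.

-- ===== PORT A =====
-- one loop iteration of A: 'if separator in candidate: candidate = candidate.split(separator, 1)[0]'
def pvCut (candidate sep : String) : String :=
  if PySem.Str.isIn sep candidate then
    match PySem.Str.splitMax? candidate sep 1 with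
    | some (piece :: _) => piece
    | _ => candidate   -- unreachable: sep is a non-empty literal, so split(sep, 1) yields a non-empty list
  else candidate

def extract_primary_variant_py (text : String) : String :=
  if text = "" then ""
  else PySem.Str.strip ([";", ",", "/", "|"].foldl pvCut text)

-- ===== PORT B =====
def extract_primary_variant_py_alt (text : String) : String :=
  if text = "" then ""
  else
    let idx : Int := [";", ",", "/", "|"].foldl
      (fun idx sep =>
        let pos := PySem.Str.find text sep
        if pos ≠ -1 ∧ pos < idx then pos else idx)
      (PySem.Str.len text)
    PySem.Str.strip (PySem.Str.slice text none (some idx))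

-- ===== PRECONDITION & SPEC =====
def Spec_extract_primary_variant_py (text : String) (out : String) : Prop := out = extract_primary_variant_py_alt text
instance (text : String) (out : String) : Decidable (Spec_extract_primary_variant_py text out) := by unfold Spec_extract_primary_variant_py; infer_instance

-- ===== CLAIM (what is proved, stated in full; the proofs are below) =====
def Claim_equal_extract_primary_variant_py : Prop := ∀ (text : String), Dom_extract_primary_variant_py text → Spec_extract_primary_variant_py text (extract_primary_variant_py text)

-- ===== LEMMAS AND PROOFS =====

-- index of the first occurrence of c in l (= l.length when c is absent)
def pvFirstIdx (c : Char) (l : List Char) : Nat := l.findIdx (fun x => x == c)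

-- what one iteration of A does to the candidate, phrased on char lists
def pvCutC (c : Char) (l : List Char) : List Char :=
  if l.any (fun x => x == c) then l.take (pvFirstIdx c l) else l

theorem pvGo_zero (sep : List Char) (fuel : Nat) (l cur : List Char) (acc : List (List Char)) :
    PySem.Chars.splitOnMax.go sep fuel 0 l cur acc = ((cur.reverse ++ l) :: acc).reverse := by
  cases fuel <;> cases l <;> simp [PySem.Chars.splitOnMax.go]

theorem pvIsIn_single (c : Char) (l : List Char) :
    PySem.Chars.isIn [c] l = l.any (fun x => x == c) := by
  by_cases h : c ∈ l
  · obtain ⟨p, q, hl⟩ := List.append_of_mem h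
    rw [(PySem.Chars.isIn_iff_infix [c] l).mpr ⟨p, q, by rw [hl]; simp⟩]
    symm
    rw [List.any_eq_true]
    exact ⟨c, h, by simp⟩
  · rw [(PySem.Chars.isIn_eq_false_iff [c] l).mpr
      (fun hi => h (hi.subset (List.mem_singleton_self c)))]
    symm
    rw [List.any_eq_false]
    intro x hx hbx
    exact h ((beq_iff_eq.mp hbx) ▸ hx)

theorem pvFind_go_single (c : Char) (s : List Char) : ∀ (k : Nat),
    PySem.Chars.find.go [c] s k =
      if s.any (fun x => x == c) then ((k + pvFirstIdx c s : Nat) : Int) else -1 := by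
  induction s with
  | nil => intro k; simp [PySem.Chars.find.go]
  | cons d t ih =>
    intro k
    by_cases h : d = c
    · simp [PySem.Chars.find.go, List.isPrefixOf, h, pvFirstIdx, List.findIdx_cons]
    · have hb : (d == c) = false := by simp [h]
      have hb' : (c == d) = false := by simp [Ne.symm h]
      rw [show PySem.Chars.find.go [c] (d :: t) k = PySem.Chars.find.go [c] t (k + 1) from by
        simp [PySem.Chars.find.go, List.isPrefixOf, hb']]
      rw [ih (k + 1)]
      by_cases ht : t.any (fun x => x == c)
      · simp only [ht, if_true, List.any_cons, hb, Bool.false_or, pvFirstIdx, List.findIdx_cons,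
          cond_false]
        omega
      · simp [ht, hb]

theorem pvFind_single (c : Char) (s : List Char) :
    PySem.Chars.find s [c] =
      if s.any (fun x => x == c) then ((pvFirstIdx c s : Nat) : Int) else -1 := by
  have h := pvFind_go_single c s 0
  simpa [PySem.Chars.find] using h

theorem pvSplit_single (c : Char) (s : List Char) : ∀ (fuel : Nat) (cur : List Char) (acc : List (List Char)),
    s.length < fuel → s.any (fun x => x == c) = true →
    PySem.Chars.splitOnMax.go [c] fuel 1 s cur acc =
      acc.reverse ++ [cur.reverse ++ s.take (pvFirstIdx c s), s.drop (pvFirstIdx c s + 1)] := by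
  induction s with
  | nil => intro fuel cur acc _ ha; simp at ha
  | cons d t ih =>
    intro fuel cur acc hf ha
    obtain ⟨f, rfl⟩ : ∃ f, fuel = f + 1 := ⟨fuel - 1, by omega⟩
    by_cases h : c = d
    · simp [PySem.Chars.splitOnMax.go, List.isPrefixOf, h, pvGo_zero, pvFirstIdx,
        List.findIdx_cons]
    · have hb : (c == d) = false := by simp [h]
      have hb2 : (d == c) = false := by simp [Ne.symm h]
      have ht : t.any (fun x => x == c) = true := by simpa [hb2] using ha
      rw [show PySem.Chars.splitOnMax.go [c] (f + 1) 1 (d :: t) cur acc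
            = PySem.Chars.splitOnMax.go [c] f 1 t (d :: cur) acc from by
        simp [PySem.Chars.splitOnMax.go, List.isPrefixOf, hb]]
      rw [ih f (d :: cur) acc (by simpa using Nat.lt_of_succ_lt_succ hf) ht]
      simp [pvFirstIdx, List.findIdx_cons, hb2, List.take_succ_cons]

theorem pvCutC_take (c : Char) (l : List Char) : ∀ (n : Nat),
    pvCutC c (l.take n) = l.take (min n (pvFirstIdx c l)) := by
  induction l with
  | nil => intro n; simp [pvCutC]
  | cons d t ih =>
    intro n
    cases n with
    | zero => simp [pvCutC]
    | succ m =>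
      by_cases h : d = c
      · simp [pvCutC, pvFirstIdx, List.findIdx_cons, h, List.take_succ_cons]
      · have hb : (d == c) = false := by simp [h]
        have key : pvCutC c (d :: t.take m) = d :: pvCutC c (t.take m) := by
          unfold pvCutC pvFirstIdx
          by_cases ht : (t.take m).any (fun x => x == c) <;>
            simp [List.findIdx_cons, hb, ht, List.take_succ_cons]
        rw [List.take_succ_cons, key, ih m]
        have hmin : min (m + 1) (pvFirstIdx c (d :: t)) = min m (pvFirstIdx c t) + 1 := by
          simp only [pvFirstIdx, List.findIdx_cons, hb, cond_false]
          omega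
        rw [hmin, List.take_succ_cons]

theorem pvCut_toList (cand sep : String) (c : Char) (hs : sep.toList = [c]) :
    (pvCut cand sep).toList = pvCutC c cand.toList := by
  unfold pvCut pvCutC
  have hin : PySem.Str.isIn sep cand = cand.toList.any (fun x => x == c) := by
    rw [PySem.Str.isIn_eq, hs, pvIsIn_single]
  by_cases ha : cand.toList.any (fun x => x == c)
  · rw [hin]
    have hsp : PySem.Str.splitMax? cand sep 1 =
        some [String.ofList (cand.toList.take (pvFirstIdx c cand.toList)),
              String.ofList (cand.toList.drop (pvFirstIdx c cand.toList + 1))] := by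
      unfold PySem.Str.splitMax?
      rw [hs]
      have hlist : PySem.Chars.splitMax? cand.toList [c] 1 =
          some [cand.toList.take (pvFirstIdx c cand.toList),
                cand.toList.drop (pvFirstIdx c cand.toList + 1)] := by
        unfold PySem.Chars.splitMax? PySem.Chars.splitOnMax
        rw [if_neg (by simp), if_neg (by omega)]
        have hgo := pvSplit_single c cand.toList (cand.toList.length + 1) [] [] (by omega) ha
        simpa using hgo
      rw [hlist]
      rfl
    rw [hsp]
    simp [ha]
  · rw [hin]
    simp [ha]

theorem pvBstep (c : Char) (s : List Char) (n : Nat) (hn : n ≤ s.length) :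
    (if PySem.Chars.find s [c] ≠ -1 ∧ PySem.Chars.find s [c] < (n : Int)
      then PySem.Chars.find s [c] else (n : Int)) = ((min n (pvFirstIdx c s) : Nat) : Int) := by
  rw [pvFind_single]
  by_cases ha : s.any (fun x => x == c)
  · simp only [ha, if_true]
    split_ifs with h
    · have hlt : pvFirstIdx c s < n := by exact_mod_cast h.2
      rw [Nat.min_eq_right (Nat.le_of_lt hlt)]
    · push Not at h
      have h2 : (n : Int) ≤ (pvFirstIdx c s : Int) := h (by
        have : (0 : Int) ≤ (pvFirstIdx c s : Int) := Int.natCast_nonneg _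
        omega)
      have h3 : n ≤ pvFirstIdx c s := by exact_mod_cast h2
      rw [Nat.min_eq_left h3]
  · have hmem : c ∉ s := by simpa using ha
    have hF : pvFirstIdx c s = s.length := by
      apply List.findIdx_eq_length.mpr
      intro x hx
      simp only [beq_eq_false_iff_ne, ne_eq]
      intro e
      exact hmem (e ▸ hx)
    simp [ha, hF, Nat.min_eq_left hn]

-- ===== VERDICT (by name: the statement is the Claim_ definition above) =====
theorem extract_primary_variant_py_spec : Claim_equal_extract_primary_variant_py := by
  intro text _
  unfold Spec_extract_primary_variant_py extract_primary_variant_py extract_primary_variant_py_alt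
  by_cases h0 : text = ""
  · simp [h0]
  · rw [if_neg h0, if_neg h0]
    obtain ⟨n1, hn1⟩ : ∃ n, min text.toList.length (pvFirstIdx ';' text.toList) = n := ⟨_, rfl⟩
    obtain ⟨n2, hn2⟩ : ∃ n, min n1 (pvFirstIdx ',' text.toList) = n := ⟨_, rfl⟩
    obtain ⟨n3, hn3⟩ : ∃ n, min n2 (pvFirstIdx '/' text.toList) = n := ⟨_, rfl⟩
    obtain ⟨n4, hn4⟩ : ∃ n, min n3 (pvFirstIdx '|' text.toList) = n := ⟨_, rfl⟩
    have hb1 : n1 ≤ text.toList.length := by omega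
    have hb2 : n2 ≤ text.toList.length := by omega
    have hb3 : n3 ≤ text.toList.length := by omega
    -- A side: the four successive cuts are four successive minimum-takes
    have e1 : (pvCut text ";").toList = text.toList.take n1 := by
      rw [pvCut_toList text ";" ';' rfl]
      have h := pvCutC_take ';' text.toList text.toList.length
      rw [List.take_length] at h
      rw [h, hn1]
    have e2 : (pvCut (pvCut text ";") ",").toList = text.toList.take n2 := by
      rw [pvCut_toList _ "," ',' rfl, e1, pvCutC_take, hn2]
    have e3 : (pvCut (pvCut (pvCut text ";") ",") "/").toList = text.toList.take n3 := by
      rw [pvCut_toList _ "/" '/' rfl, e2, pvCutC_take, hn3]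
    have e4 : (pvCut (pvCut (pvCut (pvCut text ";") ",") "/") "|").toList = text.toList.take n4 := by
      rw [pvCut_toList _ "|" '|' rfl, e3, pvCutC_take, hn4]
    -- B side: each fold step keeps the minimum position so far
    have f1 : (if PySem.Str.find text ";" ≠ -1 ∧ PySem.Str.find text ";" < PySem.Str.len text
        then PySem.Str.find text ";" else PySem.Str.len text) = ((n1 : Nat) : Int) := by
      rw [PySem.Str.find_eq, PySem.Str.len_eq, show (";" : String).toList = [';'] from rfl, ← hn1]
      exact pvBstep ';' text.toList text.toList.length (le_refl _)
    have f2 : (if PySem.Str.find text "," ≠ -1 ∧ PySem.Str.find text "," < ((n1 : Nat) : Int)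
        then PySem.Str.find text "," else ((n1 : Nat) : Int)) = ((n2 : Nat) : Int) := by
      rw [PySem.Str.find_eq, show ("," : String).toList = [','] from rfl, ← hn2]
      exact pvBstep ',' text.toList n1 hb1
    have f3 : (if PySem.Str.find text "/" ≠ -1 ∧ PySem.Str.find text "/" < ((n2 : Nat) : Int)
        then PySem.Str.find text "/" else ((n2 : Nat) : Int)) = ((n3 : Nat) : Int) := by
      rw [PySem.Str.find_eq, show ("/" : String).toList = ['/'] from rfl, ← hn3]
      exact pvBstep '/' text.toList n2 hb2
    have f4 : (if PySem.Str.find text "|" ≠ -1 ∧ PySem.Str.find text "|" < ((n3 : Nat) : Int)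
        then PySem.Str.find text "|" else ((n3 : Nat) : Int)) = ((n4 : Nat) : Int) := by
      rw [PySem.Str.find_eq, show ("|" : String).toList = ['|'] from rfl, ← hn4]
      exact pvBstep '|' text.toList n3 hb3
    simp only [List.foldl]
    rw [f1, f2, f3, f4]
    have hA : pvCut (pvCut (pvCut (pvCut text ";") ",") "/") "|"
        = String.ofList (text.toList.take n4) :=
      String.toList_inj.mp (by rw [String.toList_ofList]; exact e4)
    have hB : PySem.Str.slice text none (some ((n4 : Nat) : Int))
        = String.ofList (text.toList.take n4) :=
      String.toList_inj.mp (by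
        rw [String.toList_ofList, PySem.Str.toList_slice, PySem.Chars.slice_eq_listSlice,
          PySem.List.slice_to _ (Int.natCast_nonneg n4), Int.toNat_natCast])
    rw [hA, hB]
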